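-- pv_equiv track=rewrite | github.com/pythoneda-shared-pythonlang/infrastructure | pythoneda/shared/infrastructure/dbus/dbus_signal_listener.py | parse_signal_name
-- ===== SOURCE A (Python) =====
-- from typing import Dict, List, Tuple, Type
--
-- def parse_signal_name(value) -> List:
--     """
--     Parses a signal name into tokens.
--     :param value: The value.
--     :type value: str
--     :return: The tokens.
--     :rtype: List
--     """
--     result = []
--     tokens = value.split("_")
--     current_token = None
--     for token in tokens:
--         if token[0].isupper():
--             if current_token is not None:
--                 result.append("_".join(current_token))
--             result.append(token)
--             current_token = None
--         else:
--             if current_token is None: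
--                 current_token = []
--             current_token.append(token)
--
--     if current_token is not None:
--         result.append("_".join(current_token))
--
--     result[:-1] = [x.lower() for x in result[:-1]]
--
--     return result
-- ===== SOURCE B (Python) =====
-- def parse_signal_name(value):
--     """Parses a signal name into tokens (recursive skip-ahead formulation)."""
--     def go(tokens):
--         if not tokens:
--             return []
--         if tokens[0][0].isupper():
--             return [tokens[0]] + go(tokens[1:])
--         j = 1
--         while j < len(tokens) and not tokens[j][0].isupper():
--             j += 1
--         return ["_".join(tokens[:j])] + go(tokens[j:])
--     result = go(value.split("_"))
--     return [x.lower() for x in result[:-1]] + result[-1:]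
-- ===== Notes on version B (the rewrite author's own statement) =====
-- stated objective: alternative
-- what changed: Replaces A's single iterative pass with a pending current_token buffer by structural recursion on the token list that, at each lowercase-starting token, skip-scans ahead to the next uppercase token and slices that whole run out in one step; no accumulator or flush logic remains, and the final lowercase step builds a new list instead of mutating a slice.
import Mathlib
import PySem

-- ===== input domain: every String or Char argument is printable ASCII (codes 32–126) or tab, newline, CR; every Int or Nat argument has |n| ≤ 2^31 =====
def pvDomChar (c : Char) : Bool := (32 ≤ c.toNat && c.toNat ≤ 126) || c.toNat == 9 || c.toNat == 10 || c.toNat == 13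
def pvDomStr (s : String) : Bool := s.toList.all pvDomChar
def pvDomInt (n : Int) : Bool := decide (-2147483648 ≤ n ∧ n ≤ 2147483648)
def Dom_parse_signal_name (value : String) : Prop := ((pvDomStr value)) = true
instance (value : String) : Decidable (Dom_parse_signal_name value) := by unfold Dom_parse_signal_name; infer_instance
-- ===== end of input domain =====

-- B replaces A's accumulator/flush loop by structural recursion with a skip-ahead scan over each lowercase run; same cost, alternative structure. (A mutates `result` via slice assignment; only the return value is compared.)


-- shared helper: token[0].isupper() (under Pre_ every token is nonempty, so the none branch is unreachable there)
def pvTokenKey (t : List Char) : Bool :=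
  match PySem.List.pyGet? t 0 with
  | some c => PySem.Chars.isupper c
  | none => false

-- ===== PORT A =====
-- A's loop body over state (result, current_token : Option (List (List Char)))
def pvStepA (st : List (List Char) × Option (List (List Char))) (token : List Char) :
    List (List Char) × Option (List (List Char)) :=
  if pvTokenKey token then
    ((match st.2 with
      | some cur => st.1 ++ [PySem.Chars.join "_".toList cur]
      | none => st.1) ++ [token], none)
  else
    (st.1, some ((st.2.getD []) ++ [token]))

def parse_signal_name (value : String) : List String :=
  let tokens := PySem.Chars.splitOn value.toList "_".toList
  let st := tokens.foldl pvStepA ([], none)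
  let result :=
    match st.2 with
    | some cur => st.1 ++ [PySem.Chars.join "_".toList cur]
    | none => st.1
  -- result[:-1] = [x.lower() for x in result[:-1]]
  (result.dropLast.map PySem.Chars.lower ++ result.drop (result.length - 1)).map String.ofList

-- ===== PORT B =====
-- the while loop of B: leading tokens whose first char is not uppercase, and the rest
def pvSpanLow : List (List Char) → List (List Char) × List (List Char)
  | [] => ([], [])
  | t :: rest =>
    if pvTokenKey t then ([], t :: rest)
    else
      let p := pvSpanLow rest
      (t :: p.1, p.2)

lemma pvSpanLow_snd_length_le (ts : List (List Char)) : (pvSpanLow ts).2.length ≤ ts.length := by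
  induction ts with
  | nil => simp [pvSpanLow]
  | cons t rest ih =>
    simp only [pvSpanLow]
    split
    · simp
    · simpa using Nat.le_succ_of_le ih

-- B's recursive go: uppercase token emitted alone, lowercase run sliced out and joined in one step
def pvGoB : List (List Char) → List (List Char)
  | [] => []
  | t :: rest =>
    if pvTokenKey t then t :: pvGoB rest
    else
      PySem.Chars.join "_".toList (t :: (pvSpanLow rest).1) :: pvGoB (pvSpanLow rest).2
termination_by ts => ts.length
decreasing_by
  · simp
  · exact Nat.lt_succ_of_le (pvSpanLow_snd_length_le rest)

def parse_signal_name_alt (value : String) : List String :=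
  let result := pvGoB (PySem.Chars.splitOn value.toList "_".toList)
  -- [x.lower() for x in result[:-1]] + result[-1:]
  (result.dropLast.map PySem.Chars.lower ++ result.drop (result.length - 1)).map String.ofList

-- ===== PRECONDITION & SPEC =====
-- Pre_ excludes exactly the inputs whose underscore-split contains an empty token, on which Python A raises IndexError at token[0] (B raises there too).
def Pre_parse_signal_name (value : String) : Prop :=
  ∀ t ∈ PySem.Chars.splitOn value.toList "_".toList, t ≠ []
instance (value : String) : Decidable (Pre_parse_signal_name value) := by
  unfold Pre_parse_signal_name; infer_instance
def pvWitness_parse_signal_name : String := "abc_Def_ghi"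

def Spec_parse_signal_name (value : String) (out : List String) : Prop := out = parse_signal_name_alt value
instance (value : String) (out : List String) : Decidable (Spec_parse_signal_name value out) := by unfold Spec_parse_signal_name; infer_instance

-- ===== CLAIM (what is proved, stated in full; the proofs are below) =====
def Claim_equal_parse_signal_name : Prop := ∀ (value : String), Dom_parse_signal_name value → Pre_parse_signal_name value → Spec_parse_signal_name value (parse_signal_name value)

-- ===== LEMMAS AND PROOFS =====

-- what A's pending lowercase accumulator c contributes in front of the remaining tokens
def pvMergeB (c : List (List Char)) (ts : List (List Char)) : List (List Char) :=
  PySem.Chars.join "_".toList (c ++ (pvSpanLow ts).1) :: pvGoB (pvSpanLow ts).2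

lemma pvGoB_cons_false (t : List Char) (rest : List (List Char)) (h : pvTokenKey t = false) :
    pvGoB (t :: rest) = pvMergeB [t] rest := by
  rw [pvGoB]; simp [h, pvMergeB]

lemma pvMergeB_cons_true (t : List Char) (rest : List (List Char)) (c : List (List Char))
    (h : pvTokenKey t = true) :
    pvMergeB c (t :: rest) = PySem.Chars.join "_".toList c :: pvGoB (t :: rest) := by
  simp [pvMergeB, pvSpanLow, h]

lemma pvMergeB_cons_false (t : List Char) (rest : List (List Char)) (c : List (List Char))
    (h : pvTokenKey t = false) :
    pvMergeB c (t :: rest) = pvMergeB (c ++ [t]) rest := by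
  simp [pvMergeB, pvSpanLow, h]

-- the main invariant: A's fold from any state equals res ++ (B's recursion, with the pending run merged)
lemma pvFold_eq_goB (ts : List (List Char)) :
    ∀ (res : List (List Char)) (cur : Option (List (List Char))),
    (match (ts.foldl pvStepA (res, cur)).2 with
     | some c => (ts.foldl pvStepA (res, cur)).1 ++ [PySem.Chars.join "_".toList c]
     | none => (ts.foldl pvStepA (res, cur)).1) =
    res ++ (match cur with
            | none => pvGoB ts
            | some c => pvMergeB c ts) := by
  induction ts with
  | nil =>
    intro res cur
    rcases cur with _ | c
    · simp [pvGoB]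
    · simp [pvMergeB, pvSpanLow, pvGoB]
  | cons t rest ih =>
    intro res cur
    rw [List.foldl_cons]
    by_cases h : pvTokenKey t = true
    · rcases cur with _ | c
      · have hstep : pvStepA (res, none) t = (res ++ [t], none) := by simp [pvStepA, h]
        rw [hstep, ih]
        rw [pvGoB]
        simp [h]
      · have hstep : pvStepA (res, some c) t =
            (res ++ [PySem.Chars.join "_".toList c] ++ [t], none) := by simp [pvStepA, h]
        rw [hstep, ih]
        simp only [pvMergeB_cons_true t rest c h]
        rw [pvGoB]
        simp [h]
    · have h' : pvTokenKey t = false := by cases hk : pvTokenKey t <;> simp_all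
      rcases cur with _ | c
      · have hstep : pvStepA (res, none) t = (res, some [t]) := by simp [pvStepA, h']
        rw [hstep, ih]
        simp only [pvGoB_cons_false t rest h']
      · have hstep : pvStepA (res, some c) t = (res, some (c ++ [t])) := by simp [pvStepA, h']
        rw [hstep, ih]
        simp only [pvMergeB_cons_false t rest c h']

-- the two ports agree on every input (the Pre_ hypothesis marks where Python A returns at all)
lemma parse_signal_name_eq (value : String) :
    parse_signal_name value = parse_signal_name_alt value := by
  have h := pvFold_eq_goB (PySem.Chars.splitOn value.toList "_".toList) [] none
  simp only [List.nil_append] at h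
  simp only [parse_signal_name, parse_signal_name_alt]
  rw [h]

-- ===== VERDICT (by name: the statement is the Claim_ definition above) =====
theorem parse_signal_name_spec : Claim_equal_parse_signal_name := by
  intro value _ _
  unfold Spec_parse_signal_name
  exact parse_signal_name_eq value
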